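-- pv_equiv track=rewrite | github.com/LIANGQINGYUAN/DivoT5 | data_preprocess/c1_get_diff.py | split_diff
-- ===== SOURCE A (Python) =====
-- def split_diff(diff_output):
--     diff_segments = []
--     current_segment = []
--
--     for line in diff_output:
--         if line.startswith("@@"):
--             # start new diff
--             if current_segment:
--                 diff_segments.append(current_segment)
--             current_segment = [line]
--         else:
--             current_segment.append(line)
--
--     # add the last one
--     if current_segment:
--         diff_segments.append(current_segment)
--
--     return diff_segments
-- ===== SOURCE B (Python) =====
-- def split_diff(diff_output):
--     # Right-to-left pass: collect the tail lines of the current segment in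
--     # `pending` (in reversed order); a "@@" header closes a segment.
--     # Segments are gathered back-to-front and reversed once at the end.
--     pending = []
--     segments = []
--     for line in reversed(list(diff_output)):
--         if line.startswith("@@"):
--             segments.append([line] + pending[::-1])
--             pending = []
--         else:
--             pending.append(line)
--     if pending:
--         segments.append(pending[::-1])
--     return segments[::-1]
-- ===== Notes on version B (the rewrite author's own statement) =====
-- stated objective: alternative
-- what changed: B traverses the lines right-to-left, building segments back-to-front by prepending each '@@' header to the pending tail lines, instead of A's left-to-right accumulation with a flush at each header and at the end.
import Mathlib
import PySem

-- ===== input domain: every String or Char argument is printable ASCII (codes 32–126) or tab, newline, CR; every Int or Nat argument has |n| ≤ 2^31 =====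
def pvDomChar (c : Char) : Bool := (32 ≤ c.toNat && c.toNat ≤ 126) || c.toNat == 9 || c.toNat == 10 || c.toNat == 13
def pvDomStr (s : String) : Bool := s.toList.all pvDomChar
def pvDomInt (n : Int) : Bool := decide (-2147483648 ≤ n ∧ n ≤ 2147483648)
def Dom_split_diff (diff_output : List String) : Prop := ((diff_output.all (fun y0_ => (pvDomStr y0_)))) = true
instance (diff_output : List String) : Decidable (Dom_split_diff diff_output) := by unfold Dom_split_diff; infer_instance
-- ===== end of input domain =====

-- B builds the same segments by a right-to-left pass (back-to-front), instead of A's left-to-right flush-at-header loop; return values proved equal.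
-- ===== PORT A =====
def splitDiffStep (st : List (List String) × List String) (line : String) : List (List String) × List String :=
  if PySem.Str.startswith line "@@" then
    ((if st.2 ≠ [] then st.1 ++ [st.2] else st.1), [line])
  else
    (st.1, st.2 ++ [line])

def split_diff (diff_output : List String) : List (List String) :=
  let st := diff_output.foldl splitDiffStep ([], [])
  if st.2 ≠ [] then st.1 ++ [st.2] else st.1

-- ===== PORT B =====
-- reversed(list(...)) iteration = List.foldr; list.append = ++ [x]; xs[::-1] = .reverse
def splitDiffAltStep (line : String) (st : List String × List (List String)) : List String × List (List String) :=
  if PySem.Str.startswith line "@@" then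
    ([], st.2 ++ [line :: st.1.reverse])
  else
    (st.1 ++ [line], st.2)

def split_diff_alt (diff_output : List String) : List (List String) :=
  let st := diff_output.foldr splitDiffAltStep ([], [])
  let segs := if st.1 ≠ [] then st.2 ++ [st.1.reverse] else st.2
  segs.reverse

-- ===== PRECONDITION & SPEC =====
def Spec_split_diff (diff_output : List String) (out : List (List String)) : Prop := out = split_diff_alt diff_output
instance (diff_output : List String) (out : List (List String)) : Decidable (Spec_split_diff diff_output out) := by unfold Spec_split_diff; infer_instance

-- ===== CLAIM (what is proved, stated in full; the proofs are below) =====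
def Claim_equal_split_diff : Prop := ∀ (diff_output : List String), Dom_split_diff diff_output → Spec_split_diff diff_output (split_diff diff_output)

-- ===== LEMMAS AND PROOFS =====

-- ===== VERDICT (by name: the statement is the Claim_ definition above) =====
-- finalizers of the two loops, named for the induction
def finA (st : List (List String) × List String) : List (List String) :=
  if st.2 ≠ [] then st.1 ++ [st.2] else st.1

-- B's finalizer, generalized by A's pending segment `cur` for the induction
def finB (cur : List String) (st : List String × List (List String)) : List (List String) :=
  (if cur ++ st.1.reverse ≠ [] then st.2 ++ [cur ++ st.1.reverse] else st.2).reverse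

theorem split_diff_loop (xs : List String) :
    ∀ (acc : List (List String)) (cur : List String),
      finA (xs.foldl splitDiffStep (acc, cur)) =
        acc ++ finB cur (xs.foldr splitDiffAltStep ([], [])) := by
  induction xs with
  | nil =>
      intro acc cur
      by_cases h : cur = [] <;> simp [finA, finB, h]
  | cons l t ih =>
      intro acc cur
      by_cases h : PySem.Str.startswith l "@@"
      · simp only [List.foldl_cons, List.foldr_cons, splitDiffStep, splitDiffAltStep, h, if_pos,
          if_true, ite_true]
        rw [ih]
        by_cases hc : cur = [] <;> simp [finB, hc]
      · simp only [List.foldl_cons, List.foldr_cons, splitDiffStep, splitDiffAltStep, h, if_neg]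
        rw [ih]
        simp [finB]

theorem split_diff_spec : Claim_equal_split_diff := by
  intro xs _
  unfold Spec_split_diff split_diff split_diff_alt
  have h := split_diff_loop xs [] []
  simpa [finA, finB, List.reverse_eq_nil_iff] using h
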